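-- pv_equiv track=rewrite | github.com/Aidit-Models/CRISPR-AIdit | training-evaluation/benchmark-datasets/DSB/unifying_lindel_prediction_into_the_same_format.py | Pan_deletion_Left
-- ===== SOURCE A (Python) =====
-- def Pan_deletion_Left(read_left, delt_nucles, read_right):
--     while True:
--         try:
--             delt_one_nucle = delt_nucles[-1]  # right one nucle of deletion
--             read_left_one_nucle = read_left[-1]  # right one nucle of read_left
--             if delt_one_nucle == read_left_one_nucle:
--                 read_left = read_left[:-1]
--                 delt_nucles = delt_one_nucle + delt_nucles[:-1]
--                 read_right = delt_one_nucle + read_right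
--             else:
--                 break
--         except IndexError as e:
--             break
--     return read_left, delt_nucles, read_right
-- ===== SOURCE B (Python) =====
-- def Pan_deletion_Left(read_left, delt_nucles, read_right):
--     # Single pass: count k = number of shift steps using index arithmetic, then build outputs once.
--     rl, dn = len(read_left), len(delt_nucles)
--     k = 0
--     while k < rl and dn > 0 and delt_nucles[(dn - 1 - k % dn) % dn] == read_left[rl - 1 - k]:
--         k += 1
--     r = k % dn if dn > 0 else 0
--     new_delt = delt_nucles[dn - r:] + delt_nucles[:dn - r]
--     return read_left[:rl - k], new_delt, read_left[rl - k:] + read_right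
-- ===== Notes on version B (the rewrite author's own statement) =====
-- stated objective: faster
-- what changed: Instead of A's while-loop that re-slices and rebuilds all three strings on every step, B counts the number of shift steps k with index arithmetic (modular index into delt_nucles) in one scan and then builds the three output strings once by slicing.
import Mathlib
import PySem

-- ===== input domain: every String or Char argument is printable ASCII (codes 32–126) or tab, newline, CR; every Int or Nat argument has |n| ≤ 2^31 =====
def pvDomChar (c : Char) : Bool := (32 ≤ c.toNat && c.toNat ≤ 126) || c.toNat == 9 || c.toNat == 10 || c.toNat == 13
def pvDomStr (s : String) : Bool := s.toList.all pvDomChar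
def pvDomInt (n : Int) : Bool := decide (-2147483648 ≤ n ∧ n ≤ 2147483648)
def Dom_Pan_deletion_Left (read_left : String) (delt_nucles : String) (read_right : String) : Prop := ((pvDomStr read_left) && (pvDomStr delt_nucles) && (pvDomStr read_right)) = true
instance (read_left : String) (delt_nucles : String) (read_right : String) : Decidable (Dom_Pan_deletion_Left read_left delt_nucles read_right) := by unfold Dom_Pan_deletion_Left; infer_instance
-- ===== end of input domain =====

-- B replaces A's quadratic rebuild-per-step loop by one index-arithmetic scan counting the
-- number of shift steps, then builds the three output strings once (objective: faster).
-- ===== PORT A =====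
-- A's loop, step for step: take the last char of each string (IndexError when either is
-- empty = the else branch); if the chars are equal, drop the last char of read_left,
-- rotate delt_nucles right by one, prepend the char to read_right; otherwise stop.
def panAList (read_left delt_nucles read_right : List Char) : List Char × List Char × List Char :=
  if h : read_left ≠ [] ∧ delt_nucles ≠ [] then
    if delt_nucles.getLast h.2 == read_left.getLast h.1 then
      panAList read_left.dropLast (delt_nucles.getLast h.2 :: delt_nucles.dropLast)
        (delt_nucles.getLast h.2 :: read_right)
    else (read_left, delt_nucles, read_right)
  else (read_left, delt_nucles, read_right)
termination_by read_left.length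
decreasing_by
  have := List.length_pos_of_ne_nil h.1
  simp [List.length_dropLast]; omega

def Pan_deletion_Left (read_left : String) (delt_nucles : String) (read_right : String) : String × String × String :=
  let r := panAList read_left.toList delt_nucles.toList read_right.toList
  (String.ofList r.1, String.ofList r.2.1, String.ofList r.2.2)

-- ===== PORT B =====
-- B's while-loop condition at step k (pure index arithmetic, exactly Source B's test).
def panCond (rl dn : List Char) (k : Nat) : Bool :=
  decide (k < rl.length) && decide (0 < dn.length) &&
    (dn.getD ((dn.length - 1 - k % dn.length) % dn.length) ' ' == rl.getD (rl.length - 1 - k) ' ')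

-- B's counting loop: k += 1 while the condition holds.
def panK (rl dn : List Char) (k : Nat) : Nat :=
  if panCond rl dn k then panK rl dn (k + 1) else k
termination_by rl.length - k
decreasing_by
  rename_i h
  simp [panCond] at h
  omega

-- B's single construction of the three outputs from k.
def panBList (rl dn rr : List Char) : List Char × List Char × List Char :=
  let k := panK rl dn 0
  let m := dn.length
  let r := if 0 < m then k % m else 0
  (rl.take (rl.length - k), dn.drop (m - r) ++ dn.take (m - r), rl.drop (rl.length - k) ++ rr)

def Pan_deletion_Left_alt (read_left : String) (delt_nucles : String) (read_right : String) : String × String × String :=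
  let r := panBList read_left.toList delt_nucles.toList read_right.toList
  (String.ofList r.1, String.ofList r.2.1, String.ofList r.2.2)

-- ===== PRECONDITION & SPEC =====
def Spec_Pan_deletion_Left (read_left : String) (delt_nucles : String) (read_right : String) (out : String × String × String) : Prop := out = Pan_deletion_Left_alt read_left delt_nucles read_right
instance (read_left : String) (delt_nucles : String) (read_right : String) (out : String × String × String) : Decidable (Spec_Pan_deletion_Left read_left delt_nucles read_right out) := by unfold Spec_Pan_deletion_Left; infer_instance

-- ===== CLAIM (what is proved, stated in full; the proofs are below) =====
def Claim_equal_Pan_deletion_Left : Prop := ∀ (read_left : String) (delt_nucles : String) (read_right : String), Dom_Pan_deletion_Left read_left delt_nucles read_right → Spec_Pan_deletion_Left read_left delt_nucles read_right (Pan_deletion_Left read_left delt_nucles read_right)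

-- ===== LEMMAS AND PROOFS =====
theorem pv_succ_mod (k m : Nat) (hm : 0 < m) :
    (k + 1) % m = if k % m = m - 1 then 0 else k % m + 1 := by
  rcases Nat.lt_or_ge 1 m with h2 | h2
  · rw [Nat.add_mod]
    have h1 : 1 % m = 1 := Nat.mod_eq_of_lt h2
    have hkm := Nat.mod_lt k hm
    split
    · rename_i he; rw [h1, he]
      have : m - 1 + 1 = m := by omega
      rw [this, Nat.mod_self]
    · rename_i he; rw [h1, Nat.mod_eq_of_lt (by omega)]
  · have hm1 : m = 1 := by omega
    subst hm1; simp [Nat.mod_one]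

theorem pv_getD_dropLast (l : List Char) (j : Nat) (hj : j < l.length - 1) :
    l.dropLast.getD j ' ' = l.getD j ' ' := by
  rw [List.getD_eq_getElem?_getD, List.getD_eq_getElem?_getD, List.dropLast_eq_take,
    List.getElem?_take_of_lt hj]

theorem pv_getLast_eq_getD {l : List Char} (h : l ≠ []) :
    l.getLast h = l.getD (l.length - 1) ' ' := by
  have hp := List.length_pos_of_ne_nil h
  rw [List.getLast_eq_getElem]
  simp [List.getD, List.getElem?_eq_getElem (by omega : l.length - 1 < l.length)]

theorem pv_cond_shift (rl dn : List Char) (hrl : rl ≠ []) (hdn : dn ≠ []) (k : Nat) :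
    panCond rl.dropLast (dn.getLast hdn :: dn.dropLast) k = panCond rl dn (k + 1) := by
  have hm := List.length_pos_of_ne_nil hdn
  have hL := List.length_pos_of_ne_nil hrl
  have hdl : (dn.getLast hdn :: dn.dropLast).length = dn.length := by
    simp [List.length_dropLast]; omega
  by_cases hk : k + 1 < rl.length
  · have hkm := Nat.mod_lt k hm
    simp only [panCond, hdl, List.length_dropLast]
    have e1 : decide (k < rl.length - 1) = decide (k + 1 < rl.length) := by
      rw [decide_eq_decide]; omega
    have e2 : rl.dropLast.getD (rl.length - 1 - 1 - k) ' ' = rl.getD (rl.length - 1 - (k + 1)) ' ' := by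
      rw [pv_getD_dropLast rl _ (by omega)]
      congr 1; omega
    have e3 : (dn.getLast hdn :: dn.dropLast).getD ((dn.length - 1 - k % dn.length) % dn.length) ' '
        = dn.getD ((dn.length - 1 - (k + 1) % dn.length) % dn.length) ' ' := by
      rw [pv_succ_mod k dn.length hm]
      by_cases hc : k % dn.length = dn.length - 1
      · have hi : (dn.length - 1 - k % dn.length) % dn.length = 0 := by
          rw [hc]; simp
        rw [hi, if_pos hc, List.getD_cons_zero, pv_getLast_eq_getD hdn]
        congr 1
        rw [Nat.sub_zero, Nat.mod_eq_of_lt (by omega)]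
      · have hi : (dn.length - 1 - k % dn.length) % dn.length = dn.length - 1 - k % dn.length :=
          Nat.mod_eq_of_lt (by omega)
        rw [hi, if_neg hc]
        have hpos : 0 < dn.length - 1 - k % dn.length := by omega
        obtain ⟨j, hj⟩ : ∃ j, dn.length - 1 - k % dn.length = j + 1 := ⟨_, (Nat.succ_pred_eq_of_pos hpos).symm⟩
        rw [hj, List.getD_cons_succ, pv_getD_dropLast dn _ (by omega)]
        congr 1
        rw [Nat.mod_eq_of_lt (by omega)]
        omega
    rw [e1, e2, e3]
  · have h1 : decide (k < rl.dropLast.length) = false := by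
      simp [List.length_dropLast]; omega
    have h2 : decide (k + 1 < rl.length) = false := by simp; omega
    simp only [panCond, h1, h2, Bool.false_and]

theorem pv_K_shift (rl dn : List Char) (hrl : rl ≠ []) (hdn : dn ≠ []) (k : Nat) :
    panK rl.dropLast (dn.getLast hdn :: dn.dropLast) k + 1 = panK rl dn (k + 1) := by
  conv_lhs => rw [panK]
  conv_rhs => rw [panK]
  rw [pv_cond_shift rl dn hrl hdn k]
  by_cases hc : panCond rl dn (k + 1) = true
  · rw [if_pos hc, if_pos hc]
    exact pv_K_shift rl dn hrl hdn (k + 1)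
  · rw [if_neg hc, if_neg hc]
termination_by rl.length - k
decreasing_by
  simp [panCond] at hc
  omega

theorem pv_cond_zero (rl dn : List Char) :
    panCond rl dn 0 = true ↔
      ∃ (h : rl ≠ [] ∧ dn ≠ []), (dn.getLast h.2 == rl.getLast h.1) = true := by
  simp only [panCond, Bool.and_eq_true, decide_eq_true_eq, beq_iff_eq]
  constructor
  · rintro ⟨⟨h1, h2⟩, h3⟩
    have hrl : rl ≠ [] := by intro e; subst e; simp at h1
    have hdn : dn ≠ [] := by intro e; subst e; simp at h2
    refine ⟨⟨hrl, hdn⟩, ?_⟩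
    rw [pv_getLast_eq_getD, pv_getLast_eq_getD]
    rw [Nat.zero_mod, Nat.sub_zero, Nat.mod_eq_of_lt (by omega)] at h3
    simpa using h3
  · rintro ⟨⟨hrl, hdn⟩, he⟩
    have h1 := List.length_pos_of_ne_nil hrl
    have h2 := List.length_pos_of_ne_nil hdn
    rw [pv_getLast_eq_getD, pv_getLast_eq_getD] at he
    refine ⟨⟨h1, h2⟩, ?_⟩
    rw [Nat.zero_mod, Nat.sub_zero, Nat.mod_eq_of_lt (by omega), Nat.sub_zero]
    simpa using he

theorem pv_B_fix (rl dn rr : List Char) (h : panCond rl dn 0 = false) :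
    panBList rl dn rr = (rl, dn, rr) := by
  have hk : panK rl dn 0 = 0 := by rw [panK, h]; simp
  simp only [panBList, hk, Prod.mk.injEq]
  refine ⟨by simp, ?_, by simp⟩
  by_cases hm : 0 < dn.length
  · rw [if_pos hm, Nat.zero_mod, Nat.sub_zero]
    simp
  · rw [if_neg hm, Nat.sub_zero]
    simp

theorem pv_drop_len_sub_one (dn : List Char) (hdn : dn ≠ []) :
    dn.drop (dn.length - 1) = [dn.getLast hdn] := by
  conv_lhs => rw [← List.dropLast_append_getLast hdn]
  rw [List.drop_append_of_le_length (by simp [List.length_dropLast])]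
  simp [List.length_dropLast]

theorem pv_rot_one (dn : List Char) (hdn : dn ≠ []) :
    dn.getLast hdn :: dn.dropLast = dn.rotate (dn.length - 1) := by
  rw [List.rotate_eq_drop_append_take (by omega), pv_drop_len_sub_one dn hdn,
    ← List.dropLast_eq_take]
  rfl

theorem pv_split_drop (l : List Char) (hl : l ≠ []) (j : Nat) (hj : j ≤ l.length - 1) :
    l.drop j = l.dropLast.drop j ++ [l.getLast hl] := by
  conv_lhs => rw [← List.dropLast_append_getLast hl]
  rw [List.drop_append_of_le_length (by simp [List.length_dropLast]; omega)]

theorem pv_B_step (rl dn rr : List Char) (h : rl ≠ [] ∧ dn ≠ [])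
    (he : (dn.getLast h.2 == rl.getLast h.1) = true) :
    panBList rl.dropLast (dn.getLast h.2 :: dn.dropLast) (dn.getLast h.2 :: rr)
      = panBList rl dn rr := by
  obtain ⟨hrl, hdn⟩ := h
  have hm := List.length_pos_of_ne_nil hdn
  have hL := List.length_pos_of_ne_nil hrl
  have hc0 : panCond rl dn 0 = true := (pv_cond_zero rl dn).2 ⟨⟨hrl, hdn⟩, he⟩
  have hk : panK rl dn 0 = panK rl.dropLast (dn.getLast hdn :: dn.dropLast) 0 + 1 := by
    rw [pv_K_shift rl dn hrl hdn 0]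
    conv_lhs => rw [panK]
    rw [if_pos hc0]
  have hdl : (dn.getLast hdn :: dn.dropLast).length = dn.length := by
    simp [List.length_dropLast]; omega
  simp only [panBList, hk, hdl, List.length_dropLast, if_pos hm, Prod.mk.injEq]
  generalize panK rl.dropLast (dn.getLast hdn :: dn.dropLast) 0 = k'
  have hk'm := Nat.mod_lt k' hm
  refine ⟨?_, ?_, ?_⟩
  · rw [List.dropLast_eq_take, List.take_take]
    congr 1
    omega
  · rw [← List.rotate_eq_drop_append_take (by rw [hdl]; omega),
      ← List.rotate_eq_drop_append_take (l := dn) (by omega),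
      pv_rot_one dn hdn, List.rotate_rotate, ← List.rotate_mod,
      ← List.rotate_mod (n := dn.length - (k' + 1) % dn.length)]
    congr 1
    rw [pv_succ_mod k' dn.length hm]
    by_cases hc : k' % dn.length = dn.length - 1
    · rw [if_pos hc]
      congr 1
      omega
    · rw [if_neg hc]
      have hA : (dn.length - 1 + (dn.length - k' % dn.length)) % dn.length
          = dn.length - 1 - k' % dn.length := by
        rw [(show dn.length - 1 + (dn.length - k' % dn.length)
            = dn.length + (dn.length - 1 - k' % dn.length) by omega),
          Nat.add_mod_left, Nat.mod_eq_of_lt (by omega)]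
      rw [hA, Nat.mod_eq_of_lt (show dn.length - (k' % dn.length + 1) < dn.length by omega)]
      omega
  · have hgl : dn.getLast hdn = rl.getLast hrl := by simpa using he
    rw [pv_split_drop rl hrl _ (by omega), hgl,
      (show rl.length - (k' + 1) = rl.length - 1 - k' by omega)]
    simp

theorem pv_list_main (rl dn rr : List Char) : panAList rl dn rr = panBList rl dn rr := by
  rw [panAList]
  split
  · rename_i h
    split
    · rename_i he
      rw [pv_list_main]
      exact pv_B_step rl dn rr h he
    · rename_i he
      refine (pv_B_fix rl dn rr ?_).symm
      rcases hc : panCond rl dn 0 with _ | _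
      · rfl
      · obtain ⟨h', he'⟩ := (pv_cond_zero rl dn).1 hc
        exact absurd he' he
  · rename_i h
    refine (pv_B_fix rl dn rr ?_).symm
    rcases hc : panCond rl dn 0 with _ | _
    · rfl
    · obtain ⟨h', he'⟩ := (pv_cond_zero rl dn).1 hc
      exact absurd h' h
termination_by rl.length
decreasing_by
  rename_i h _he
  have := List.length_pos_of_ne_nil h.1
  simp [List.length_dropLast]; omega

-- ===== VERDICT (by name: the statement is the Claim_ definition above) =====
theorem Pan_deletion_Left_spec : Claim_equal_Pan_deletion_Left := by
  intro a b c _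
  show _ = _
  simp only [Pan_deletion_Left, Pan_deletion_Left_alt, pv_list_main]
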